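-- pv_equiv track=rewrite | github.com/yukikoyanagi/metastructure | alignstrands.py | conn_comp
-- ===== SOURCE A (Python) =====
-- def conn_comp(s, start):
--     "s is a set of 2-tuples. Return the connected component of s "
--     "which contains start."
--     # conn_comp({(0,1),(2,3),(1,4),(4,6),(2,5)}, 0) --> {(0,1), (1,4), (4,6)}
--     remain = set([i for p in s for i in p])
--     comp = set()
--     if start in remain:
--         comp |= {e for e in s if start in e}
--         s = s - comp # Do not mutate; i.e. no '-='
--         for i in set([j for p in comp for j in p if j != start]):
--             comp |= conn_comp(s, i)
--     return comp
-- ===== SOURCE B (Python) =====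
-- def conn_comp(s, start):
--     "s is a set of 2-tuples. Return the connected component of s "
--     "which contains start."
--     # Iterative DFS on a worklist of nodes over a shrinking edge list:
--     # no recursion, no repeated set algebra over whole components.
--     remaining = list(s)
--     comp = []
--     stack = [start]
--     while stack:
--         v = stack.pop()
--         inc = [e for e in remaining if v in e]
--         remaining = [e for e in remaining if v not in e]
--         comp += inc
--         nbrs = list(dict.fromkeys(j for e in inc for j in e if j != v))
--         stack += reversed(nbrs)
--     return set(comp)
-- ===== Notes on version B (the rewrite author's own statement) =====
-- stated objective: faster
-- what changed: A's recursion with set algebra (which rebuilds whole components once per neighbour and recurses once per vertex fan-out) is replaced by a single iterative DFS worklist over a shrinking edge list, collecting each edge exactly once.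
import Mathlib
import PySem

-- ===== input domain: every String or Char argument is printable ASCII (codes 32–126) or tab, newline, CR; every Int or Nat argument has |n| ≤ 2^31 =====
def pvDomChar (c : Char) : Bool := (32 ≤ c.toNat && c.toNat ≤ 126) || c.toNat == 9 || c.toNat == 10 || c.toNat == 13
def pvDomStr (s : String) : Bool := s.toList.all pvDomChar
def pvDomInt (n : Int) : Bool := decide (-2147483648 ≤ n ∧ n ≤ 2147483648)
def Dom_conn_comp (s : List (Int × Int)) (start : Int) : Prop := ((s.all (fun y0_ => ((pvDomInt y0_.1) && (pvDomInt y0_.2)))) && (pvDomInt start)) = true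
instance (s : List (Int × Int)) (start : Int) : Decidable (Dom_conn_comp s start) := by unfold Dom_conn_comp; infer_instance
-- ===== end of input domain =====

-- B replaces A's recursive set algebra (which re-derives whole components once per neighbour,
-- exponentially in the worst case) by one iterative DFS worklist over a shrinking edge list.

-- ===== PORT A =====
-- helper cited by the termination proof of the port below
theorem pv_unattach_filter {α : Type} (l : List α) (g : α → Bool) :
    (List.filter (fun x : {x // x ∈ l} => g x.1) l.attach).unattach = l.filter g := by
  rw [List.unattach_filter (g := g) (hf := fun x h => rfl), List.unattach_attach]

-- literal port of Source A; Python sets are modelled as PySem.Set (distinct elements, insertion order)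
def conn_comp (s : List (Int × Int)) (start : Int) : List (Int × Int) :=
  -- remain = set([i for p in s for i in p])
  let remain : PySem.Set Int := PySem.Set.ofList (s.flatMap (fun p => [p.1, p.2]))
  -- if start in remain:
  if h : PySem.Set.contains remain start = true then
    -- comp = set(); comp |= {e for e in s if start in e}
    let comp : PySem.Set (Int × Int) :=
      PySem.Set.union PySem.Set.empty (PySem.Set.ofList (s.filter (fun e => e.1 == start || e.2 == start)))
    -- s = s - comp
    let s2 : PySem.Set (Int × Int) := PySem.Set.diff s comp
    -- for i in set([j for p in comp for j in p if j != start]): comp |= conn_comp(s, i)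
    List.foldl (fun c i => PySem.Set.union c (conn_comp s2 i)) comp
      (PySem.Set.ofList ((comp.flatMap (fun p => [p.1, p.2])).filter (fun j => !(j == start))))
  else PySem.Set.empty
termination_by s.length
decreasing_by
  rw [PySem.Set.contains_iff, PySem.Set.mem_ofList] at h
  simp only [List.mem_flatMap] at h
  obtain ⟨q, -, hmem⟩ := h
  simp only [PySem.Set.diff]
  rw [List.length_filter_lt_length_iff_exists]
  refine ⟨q.1, q.2, ?_⟩
  simp only [Bool.not_eq_true', Bool.not_eq_false]
  rw [PySem.Set.contains_iff, PySem.Set.union_eq_update, PySem.Set.mem_update, PySem.Set.mem_ofList]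
  refine Or.inr (List.mem_unattach.mpr ⟨q.2, List.mem_filter.mpr ⟨List.mem_attach _ _, ?_⟩⟩)
  simp only [List.mem_cons, List.not_mem_nil, or_false] at hmem
  rcases hmem with h1 | h1 <;> simp [h1]

-- ===== PORT B =====
-- literal port of Source B's while loop; the Python stack pops from the END, modelled with the top at the HEAD
def conn_comp_loop (remaining : List (Int × Int)) (comp : List (Int × Int)) (stack : List Int) :
    List (Int × Int) :=
  match stack with
  | [] => comp
  | v :: st =>
    -- inc = [e for e in remaining if v in e]
    let inc := remaining.filter (fun e => e.1 == v || e.2 == v)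
    -- remaining = [e for e in remaining if v not in e]
    let rem' := remaining.filter (fun e => !(e.1 == v || e.2 == v))
    -- nbrs = list(dict.fromkeys(j for e in inc for j in e if j != v))
    let nbrs := PySem.List.dedup ((inc.flatMap (fun e => [e.1, e.2])).filter (fun j => !(j == v)))
    -- comp += inc; stack += reversed(nbrs)  (top-at-head: push nbrs in order)
    conn_comp_loop rem' (comp ++ inc) (nbrs ++ st)
termination_by (remaining.length, stack.length)
decreasing_by
  rw [pv_unattach_filter remaining (fun e => !(e.1 == v || e.2 == v)),
      pv_unattach_filter remaining (fun e => e.1 == v || e.2 == v)]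
  by_cases hinc : remaining.filter (fun e => e.1 == v || e.2 == v) = []
  · have h1 : remaining.filter (fun e => !(e.1 == v || e.2 == v)) = remaining := by
      rw [List.filter_eq_self]
      intro a ha
      simpa using List.filter_eq_nil_iff.mp hinc a ha
    rw [h1, hinc]
    simp only [List.flatMap_nil, List.filter_nil]
    have h2 : PySem.List.dedup ([] : List Int) = [] := rfl
    rw [h2, List.nil_append]
    exact Prod.Lex.right _ (by simp)
  · apply Prod.Lex.left
    rw [List.length_filter_lt_length_iff_exists]
    obtain ⟨e, he⟩ := List.exists_mem_of_ne_nil _ hinc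
    have h3 := List.mem_filter.mp he
    exact ⟨e, h3.1, by simp [h3.2]⟩

def conn_comp_alt (s : List (Int × Int)) (start : Int) : List (Int × Int) :=
  -- remaining = list(s); comp = []; stack = [start]; while stack: …; return set(comp)
  PySem.Set.ofList (conn_comp_loop s [] [start])

-- ===== PRECONDITION & SPEC =====
-- repr of a pair, '(a, b)', as Python writes it
def pvPairRepr (p : Int × Int) : List Char :=
  '(' :: (PySem.Int.toChars p.1 ++ ',' :: ' ' :: (PySem.Int.toChars p.2 ++ [')']))
-- s is a Python set of pairs: it reaches the ports as the list of its distinct elements in the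
-- canonical (repr-sorted) order in which the type convention lists a set.  Pre_ excludes list
-- encodings out of that order: the one sampled such input is the seeded docstring example, which
-- reaches A as a plain list of (unhashable) lists, and A raises TypeError on it (set ops on lists).
def Pre_conn_comp (s : List (Int × Int)) (start : Int) : Prop :=
  List.Pairwise (fun a b => pvPairRepr a < pvPairRepr b) s
instance (s : List (Int × Int)) (start : Int) : Decidable (Pre_conn_comp s start) := by
  unfold Pre_conn_comp; infer_instance
def pvWitness_conn_comp : (List (Int × Int)) × Int := ([(0, 1), (1, 2), (5, 6)], 0)

def Spec_conn_comp (s : List (Int × Int)) (start : Int) (out : List (Int × Int)) : Prop :=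
  out = conn_comp_alt s start
instance (s : List (Int × Int)) (start : Int) (out : List (Int × Int)) :
    Decidable (Spec_conn_comp s start out) := by unfold Spec_conn_comp; infer_instance

-- ===== CLAIM (what is proved, stated in full; the proofs are below) =====
def Claim_equal_conn_comp : Prop := ∀ (s : List (Int × Int)) (start : Int),
  Dom_conn_comp s start → Pre_conn_comp s start → Spec_conn_comp s start (conn_comp s start)

-- ===== LEMMAS AND PROOFS =====

-- the edges of rem incident to v, in order ("[e for e in rem if v in e]")
def pvInc (rem : List (Int × Int)) (v : Int) : List (Int × Int) :=
  rem.filter (fun e => e.1 == v || e.2 == v)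

-- the edges of rem not incident to v, in order
def pvRem (rem : List (Int × Int)) (v : Int) : List (Int × Int) :=
  rem.filter (fun e => !(e.1 == v || e.2 == v))

-- the neighbours of v along pvInc, first occurrences in order
def pvNbrs (rem : List (Int × Int)) (v : Int) : List Int :=
  PySem.List.dedup (((pvInc rem v).flatMap (fun e => [e.1, e.2])).filter (fun j => !(j == v)))

theorem mem_pvInc {rem : List (Int × Int)} {v : Int} {e : Int × Int} :
    e ∈ pvInc rem v ↔ e ∈ rem ∧ (e.1 = v ∨ e.2 = v) := by
  simp [pvInc, List.mem_filter]

theorem mem_pvRem {rem : List (Int × Int)} {v : Int} {e : Int × Int} :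
    e ∈ pvRem rem v ↔ e ∈ rem ∧ ¬(e.1 = v ∨ e.2 = v) := by
  simp [pvRem, List.mem_filter]

theorem mem_pvNbrs {rem : List (Int × Int)} {v j : Int} :
    j ∈ pvNbrs rem v ↔ j ≠ v ∧ ∃ e ∈ pvInc rem v, j = e.1 ∨ j = e.2 := by
  simp only [pvNbrs, PySem.List.mem_dedup, List.mem_filter, List.mem_flatMap]
  constructor
  · rintro ⟨⟨e, he, hj⟩, hne⟩
    simp only [List.mem_cons, List.not_mem_nil, or_false] at hj
    exact ⟨by simpa using hne, e, he, hj⟩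
  · rintro ⟨hne, e, he, hj⟩
    exact ⟨⟨e, he, by simpa using hj⟩, by simpa using hne⟩

theorem pvInc_disj_pvRem {rem : List (Int × Int)} {v : Int} {e : Int × Int}
    (h : e ∈ pvInc rem v) : e ∉ pvRem rem v := by
  intro h2
  exact (mem_pvRem.mp h2).2 (mem_pvInc.mp h).2

theorem pvRem_length_lt {rem : List (Int × Int)} {v : Int} (h : pvInc rem v ≠ []) :
    (pvRem rem v).length < rem.length := by
  obtain ⟨e, he⟩ := List.exists_mem_of_ne_nil _ h
  have h3 := List.mem_filter.mp he
  rw [pvRem, List.length_filter_lt_length_iff_exists]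
  exact ⟨e, h3.1, by simp [h3.2]⟩

-- A's body, simplified under Nodup: incident edges, then fold in the recursive components
theorem conn_comp_eq (rem : List (Int × Int)) (v : Int) (hn : rem.Nodup) :
    conn_comp rem v =
      if pvInc rem v = [] then []
      else
        List.foldl (fun c i => PySem.Set.update c (conn_comp (pvRem rem v) i))
          (pvInc rem v) (pvNbrs rem v) := by
  rw [conn_comp.eq_def]
  have hcomp : PySem.Set.union PySem.Set.empty
      (PySem.Set.ofList (List.filter (fun e => e.1 == v || e.2 == v) rem)) = pvInc rem v := by
    rw [PySem.Set.union_eq_update,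
      show (PySem.Set.empty : PySem.Set (Int × Int)) = [] from rfl,
      PySem.Set.update_nil_left, PySem.Set.ofList_ofList,
      PySem.Set.ofList_eq_self_of_nodup _ (hn.filter _)]
    rfl
  simp only [hcomp]
  have hguard : (PySem.Set.contains (PySem.Set.ofList (rem.flatMap fun p => [p.1, p.2])) v = true)
      ↔ pvInc rem v ≠ [] := by
    rw [PySem.Set.contains_iff, PySem.Set.mem_ofList]
    constructor
    · intro h
      simp only [List.mem_flatMap, List.mem_cons, List.not_mem_nil, or_false] at h
      obtain ⟨p, hp, h1 | h1⟩ := h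
      · exact List.ne_nil_of_mem (mem_pvInc.mpr ⟨hp, Or.inl h1.symm⟩)
      · exact List.ne_nil_of_mem (mem_pvInc.mpr ⟨hp, Or.inr h1.symm⟩)
    · intro h
      obtain ⟨e, he⟩ := List.exists_mem_of_ne_nil _ h
      obtain ⟨hm, h1 | h1⟩ := mem_pvInc.mp he
      · exact List.mem_flatMap.mpr ⟨e, hm, by simp [h1]⟩
      · exact List.mem_flatMap.mpr ⟨e, hm, by simp [h1]⟩
  have hdiff : PySem.Set.diff rem (pvInc rem v) = pvRem rem v := by
    rw [PySem.Set.diff, pvRem]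
    apply List.filter_congr
    intro e he
    rw [Bool.eq_iff_iff]
    simp only [Bool.not_eq_true']
    constructor
    · intro hc
      rw [Bool.eq_false_iff] at hc ⊢
      intro hb
      exact hc (by rw [PySem.Set.contains_iff]; exact mem_pvInc.mpr ⟨he, by simpa using hb⟩)
    · intro hc
      rw [Bool.eq_false_iff] at hc ⊢
      intro hb
      rw [PySem.Set.contains_iff] at hb
      exact hc (by simpa using (mem_pvInc.mp hb).2)
  have hnbrs : PySem.Set.ofList (((pvInc rem v).flatMap (fun p => [p.1, p.2])).filter
      (fun j => !(j == v))) = pvNbrs rem v := rfl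
  by_cases hinc : pvInc rem v = []
  · rw [dif_neg (by rw [hguard]; exact not_not_intro hinc), if_pos hinc]
    rfl
  · rw [dif_pos (hguard.mpr hinc), if_neg hinc, hdiff, hnbrs]
    apply PySem.List.foldl_congr_mem
    intro c i _
    rw [PySem.Set.union_eq_update]

-- B's loop, one unfolding per stack shape
theorem loop_nil (rem comp : List (Int × Int)) : conn_comp_loop rem comp [] = comp := by
  rw [conn_comp_loop]

theorem loop_cons (rem comp : List (Int × Int)) (v : Int) (st : List Int) :
    conn_comp_loop rem comp (v :: st) =
      conn_comp_loop (pvRem rem v) (comp ++ pvInc rem v) (pvNbrs rem v ++ st) := by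
  rw [conn_comp_loop]
  rfl

-- membership and Nodup facts about a fold of set-updates
theorem mem_foldl_upd (f : Int → List (Int × Int)) (l : List Int) (c : List (Int × Int))
    (e : Int × Int) :
    e ∈ List.foldl (fun c i => PySem.Set.update c (f i)) c l ↔ e ∈ c ∨ ∃ i ∈ l, e ∈ f i := by
  induction l generalizing c with
  | nil => simp
  | cons a l ih =>
    rw [List.foldl_cons, ih, PySem.Set.mem_update]
    constructor
    · rintro ((h | h) | ⟨i, hi, h⟩)
      · exact Or.inl h
      · exact Or.inr ⟨a, by simp, h⟩
      · exact Or.inr ⟨i, by simp [hi], h⟩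
    · rintro (h | ⟨i, hi, h⟩)
      · exact Or.inl (Or.inl h)
      · rcases List.mem_cons.mp hi with rfl | hi
        · exact Or.inl (Or.inr h)
        · exact Or.inr ⟨i, hi, h⟩

theorem nodup_foldl_upd (f : Int → List (Int × Int)) (l : List Int) (c : List (Int × Int))
    (hc : c.Nodup) :
    (List.foldl (fun c i => PySem.Set.update c (f i)) c l).Nodup := by
  induction l generalizing c with
  | nil => exact hc
  | cons a l ih => exact ih _ (PySem.Set.nodup_update _ _ hc)

theorem upd_of_subset {s t : List (Int × Int)} (h : ∀ x ∈ t, x ∈ s) :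
    PySem.Set.update s t = s := by
  induction t generalizing s with
  | nil => rfl
  | cons a t ih =>
    show PySem.Set.update (PySem.Set.add s a) t = s
    rw [PySem.Set.add_of_mem (h a (by simp))]
    exact ih fun x hx => h x (by simp [hx])

theorem upd_of_disjoint {s t : List (Int × Int)} (hnd : t.Nodup) (h : ∀ x ∈ t, x ∉ s) :
    PySem.Set.update s t = s ++ t := by
  induction t generalizing s with
  | nil => simp [PySem.Set.update]
  | cons a t ih =>
    show PySem.Set.update (PySem.Set.add s a) t = s ++ a :: t
    rw [PySem.Set.add_of_not_mem (h a (by simp))]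
    rw [ih (List.nodup_cons.mp hnd).2, List.append_assoc]
    · rfl
    · intro x hx
      simp only [List.mem_append, List.mem_singleton]
      rintro (hs | rfl)
      · exact h x (by simp [hx]) hs
      · exact (List.nodup_cons.mp hnd).1 hx

-- vertex adjacency and reachability in an edge list
def pvAdj (rem : List (Int × Int)) (a b : Int) : Prop := (a, b) ∈ rem ∨ (b, a) ∈ rem
def pvReach (rem : List (Int × Int)) : Int → Int → Prop := Relation.ReflTransGen (pvAdj rem)

theorem pvReach_symm {rem : List (Int × Int)} {a b : Int} (h : pvReach rem a b) :
    pvReach rem b a :=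
  Relation.ReflTransGen.symmetric (fun _ _ h => Or.symm h) h

theorem pvReach_mono {rem : List (Int × Int)} {p : Int × Int → Bool} {a b : Int}
    (h : pvReach (rem.filter p) a b) : pvReach rem a b := by
  refine Relation.ReflTransGen.mono ?_ h
  intro x y hxy
  rcases hxy with h | h
  · exact Or.inl (List.mem_of_mem_filter h)
  · exact Or.inr (List.mem_of_mem_filter h)

theorem pvReach_edge {rem : List (Int × Int)} {e : Int × Int} (he : e ∈ rem) :
    pvReach rem e.1 e.2 :=
  Relation.ReflTransGen.single (Or.inl (by rwa [Prod.mk.eta]))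

theorem cc_subset : ∀ (n : Nat) (rem : List (Int × Int)), rem.length ≤ n → rem.Nodup →
    ∀ (v : Int) (e : Int × Int), e ∈ conn_comp rem v → e ∈ rem := by
  intro n
  induction n with
  | zero =>
    intro rem hlen hn v e he
    rw [List.length_eq_zero_iff.mp (Nat.le_zero.mp hlen)] at *
    rw [conn_comp_eq _ _ hn, if_pos (by simp [pvInc])] at he
    exact absurd he (List.not_mem_nil)
  | succ n ih =>
    intro rem hlen hn v e he
    rw [conn_comp_eq _ _ hn] at he
    split_ifs at he with hinc
    · exact absurd he (List.not_mem_nil)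
    · rcases (mem_foldl_upd _ _ _ _).mp he with h | ⟨i, _, h⟩
      · exact (mem_pvInc.mp h).1
      · have hlt := pvRem_length_lt hinc
        have h2 := ih (pvRem rem v) (by omega) (hn.filter _) i e h
        exact (mem_pvRem.mp h2).1

theorem cc_incident (rem : List (Int × Int)) (hn : rem.Nodup) (v : Int) (e : Int × Int)
    (he : e ∈ rem) (hi : e.1 = v ∨ e.2 = v) : e ∈ conn_comp rem v := by
  have hmem : e ∈ pvInc rem v := mem_pvInc.mpr ⟨he, hi⟩
  rw [conn_comp_eq _ _ hn, if_neg (List.ne_nil_of_mem hmem)]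
  exact (mem_foldl_upd _ _ _ _).mpr (Or.inl hmem)

theorem cc_reach : ∀ (n : Nat) (rem : List (Int × Int)), rem.length ≤ n → rem.Nodup →
    ∀ (v : Int) (e : Int × Int), e ∈ conn_comp rem v →
      pvReach rem v e.1 ∧ pvReach rem v e.2 := by
  intro n
  induction n with
  | zero =>
    intro rem hlen hn v e he
    rw [List.length_eq_zero_iff.mp (Nat.le_zero.mp hlen)] at *
    rw [conn_comp_eq _ _ hn, if_pos (by simp [pvInc])] at he
    exact absurd he (List.not_mem_nil)
  | succ n ih =>
    intro rem hlen hn v e he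
    rw [conn_comp_eq _ _ hn] at he
    split_ifs at he with hinc
    · exact absurd he (List.not_mem_nil)
    · rcases (mem_foldl_upd _ _ _ _).mp he with h | ⟨i, hi, h⟩
      · obtain ⟨hmem, h1 | h1⟩ := mem_pvInc.mp h
        · constructor
          · rw [h1]; exact Relation.ReflTransGen.refl
          · rw [← h1]; exact pvReach_edge hmem
        · constructor
          · rw [← h1]; exact pvReach_symm (pvReach_edge hmem)
          · rw [h1]; exact Relation.ReflTransGen.refl

      · have hlt := pvRem_length_lt hinc
        obtain ⟨h1, h2⟩ := ih (pvRem rem v) (by omega) (hn.filter _) i e h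
        obtain ⟨hne, f, hf, hjf⟩ := mem_pvNbrs.mp hi
        obtain ⟨hfmem, hfv⟩ := mem_pvInc.mp hf
        have hvi : pvReach rem v i := by
          rcases hfv with h3 | h3 <;> rcases hjf with h4 | h4
        -- f = (v, ...) cases: build a single adjacency step through f
          · exact absurd (h4.trans h3) hne
          · exact Relation.ReflTransGen.single (Or.inl (by rw [← h3, h4, Prod.mk.eta]; exact hfmem))
          · exact Relation.ReflTransGen.single (Or.inr (by rw [h4, ← h3, Prod.mk.eta]; exact hfmem))
          · exact absurd (h4.trans h3) hne
        exact ⟨hvi.trans (pvReach_mono h1), hvi.trans (pvReach_mono h2)⟩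

theorem cc_closed : ∀ (n : Nat) (rem : List (Int × Int)), rem.length ≤ n → rem.Nodup →
    ∀ (v : Int) (f e : Int × Int), f ∈ conn_comp rem v → e ∈ rem →
      (∃ x, (x = e.1 ∨ x = e.2) ∧ (x = f.1 ∨ x = f.2)) → e ∈ conn_comp rem v := by
  intro n
  induction n with
  | zero =>
    intro rem hlen hn v f e hf he _
    rw [List.length_eq_zero_iff.mp (Nat.le_zero.mp hlen)] at *
    exact absurd he (List.not_mem_nil)
  | succ n ih =>
    intro rem hlen hn v f e hf he hshare
    rw [conn_comp_eq _ _ hn] at hf ⊢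
    split_ifs at hf ⊢ with hinc
    · exact absurd hf (List.not_mem_nil)
    · by_cases hPe : e.1 = v ∨ e.2 = v
      · exact (mem_foldl_upd _ _ _ _).mpr (Or.inl (mem_pvInc.mpr ⟨he, hPe⟩))
      · have heR : e ∈ pvRem rem v := mem_pvRem.mpr ⟨he, hPe⟩
        obtain ⟨x, hxe, hxf⟩ := hshare
        have hxv : x ≠ v := by
          rintro rfl
          rcases hxe with h1 | h1
          · exact hPe (Or.inl h1.symm)
          · exact hPe (Or.inr h1.symm)
        have hlt := pvRem_length_lt hinc
        rcases (mem_foldl_upd _ _ _ _).mp hf with h | ⟨j, hj, h⟩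
        · have hxn : x ∈ pvNbrs rem v := mem_pvNbrs.mpr ⟨hxv, f, h, hxf⟩
          refine (mem_foldl_upd _ _ _ _).mpr (Or.inr ⟨x, hxn, ?_⟩)
          exact cc_incident _ (hn.filter _) x e heR (by rcases hxe with h1 | h1 <;> simp [h1.symm])
        · refine (mem_foldl_upd _ _ _ _).mpr (Or.inr ⟨j, hj, ?_⟩)
          exact ih (pvRem rem v) (by omega) (hn.filter _) j f e h heR ⟨x, hxe, hxf⟩

theorem cc_of_reach (rem : List (Int × Int)) (hn : rem.Nodup) (v x : Int)
    (h : pvReach rem v x) (e : Int × Int) (he : e ∈ rem) (hx : x = e.1 ∨ x = e.2) :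
    e ∈ conn_comp rem v := by
  induction h generalizing e with
  | refl => exact cc_incident rem hn v e he (by rcases hx with h1 | h1 <;> simp [h1.symm])
  | @tail b c _ hstep ih =>
    rcases hstep with hg | hg
    · have hgcc := ih (b, c) hg (Or.inl rfl)
      exact cc_closed rem.length rem le_rfl hn v (b, c) e hgcc he ⟨c, hx, Or.inr rfl⟩
    · have hgcc := ih (c, b) hg (Or.inr rfl)
      exact cc_closed rem.length rem le_rfl hn v (c, b) e hgcc he ⟨c, hx, Or.inl rfl⟩

theorem cc_mem_iff (rem : List (Int × Int)) (hn : rem.Nodup) (v : Int) (e : Int × Int) :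
    e ∈ conn_comp rem v ↔ e ∈ rem ∧ (pvReach rem v e.1 ∨ pvReach rem v e.2) := by
  constructor
  · intro h
    exact ⟨cc_subset rem.length rem le_rfl hn v e h,
      Or.inl (cc_reach rem.length rem le_rfl hn v e h).1⟩
  · rintro ⟨he, h | h⟩
    · exact cc_of_reach rem hn v e.1 h e he (Or.inl rfl)
    · exact cc_of_reach rem hn v e.2 h e he (Or.inr rfl)

theorem cc_comp_subset (rem : List (Int × Int)) (hn : rem.Nodup) (i j : Int)
    (f : Int × Int) (hfi : f ∈ conn_comp rem i) (hfj : f ∈ conn_comp rem j)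
    (e : Int × Int) (he : e ∈ conn_comp rem i) : e ∈ conn_comp rem j := by
  have hfmem := cc_subset rem.length rem le_rfl hn i f hfi
  have hif := (cc_reach rem.length rem le_rfl hn i f hfi).1
  have hjf := (cc_reach rem.length rem le_rfl hn j f hfj).1
  have hie := (cc_reach rem.length rem le_rfl hn i e he).1
  have hji : pvReach rem j i := hjf.trans (pvReach_symm hif)
  exact cc_mem_iff rem hn j e |>.mpr
    ⟨cc_subset rem.length rem le_rfl hn i e he, Or.inl (hji.trans hie)⟩

theorem cc_nodup : ∀ (n : Nat) (rem : List (Int × Int)), rem.length ≤ n → rem.Nodup →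
    ∀ (v : Int), (conn_comp rem v).Nodup := by
  intro n rem hlen hn v
  rw [conn_comp_eq _ _ hn]
  split_ifs with hinc
  · exact List.nodup_nil
  · exact nodup_foldl_upd _ _ _ (hn.filter _)

-- filtering away edges outside the component changes nothing (order included)
theorem cc_filter_inv : ∀ (n : Nat) (rem : List (Int × Int)), rem.length ≤ n → rem.Nodup →
    ∀ (p : Int × Int → Bool) (v : Int), (∀ e ∈ conn_comp rem v, p e = true) →
      conn_comp (rem.filter p) v = conn_comp rem v := by
  intro n
  induction n with
  | zero =>
    intro rem hlen hn p v _
    rw [List.length_eq_zero_iff.mp (Nat.le_zero.mp hlen)] at *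
    rw [List.filter_nil]
  | succ n ih =>
    intro rem hlen hn p v hp
    have hIncEq : pvInc (rem.filter p) v = pvInc rem v := by
      rw [pvInc, pvInc, List.filter_comm]
      apply List.filter_eq_self.mpr
      intro e he
      exact hp e (cc_incident rem hn v e (List.mem_of_mem_filter he)
        (by simpa using (List.mem_filter.mp he).2))
    rw [conn_comp_eq _ _ (hn.filter _), conn_comp_eq _ _ hn]
    by_cases hinc : pvInc rem v = []
    · rw [if_pos (by rw [hIncEq]; exact hinc), if_pos hinc]
    · rw [if_neg (by rw [hIncEq]; exact hinc), if_neg hinc]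
      have hNbrsEq : pvNbrs (rem.filter p) v = pvNbrs rem v := by
        rw [pvNbrs, pvNbrs, hIncEq]
      have hRemEq : pvRem (rem.filter p) v = (pvRem rem v).filter p := by
        rw [pvRem, pvRem, List.filter_comm]
      rw [hNbrsEq, hIncEq, hRemEq]
      apply PySem.List.foldl_congr_mem
      intro c j hj
      have hlt := pvRem_length_lt hinc
      rw [ih (pvRem rem v) (by omega) (hn.filter _) p j ?_]
      intro e he
      apply hp
      rw [conn_comp_eq _ _ hn, if_neg hinc]
      exact (mem_foldl_upd _ _ _ _).mpr (Or.inr ⟨j, hj, he⟩)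

-- A's fold over a worklist of start vertices, shared shape of the two proofs below
def pvFold (rem' inc : List (Int × Int)) (l : List Int) : List (Int × Int) :=
  List.foldl (fun c j => PySem.Set.update c (conn_comp rem' j)) inc l

theorem mem_pvFold (rem' inc : List (Int × Int)) (l : List Int) (e : Int × Int) :
    e ∈ pvFold rem' inc l ↔ e ∈ inc ∨ ∃ j ∈ l, e ∈ conn_comp rem' j :=
  mem_foldl_upd (fun j => conn_comp rem' j) l inc e

theorem pvFold_append_singleton (rem' inc : List (Int × Int)) (pre : List Int) (i : Int) :
    pvFold rem' inc (pre ++ [i]) =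
      PySem.Set.update (pvFold rem' inc pre) (conn_comp rem' i) := by
  rw [pvFold, List.foldl_append]
  rfl

-- one harvesting step of the dichotomy: either i's component was already collected, or it is new
theorem harvest (rem' inc : List (Int × Int)) (hn : rem'.Nodup)
    (hdisj : ∀ e ∈ inc, e ∉ rem') (pre : List Int) (i : Int) :
    (pvFold rem' inc pre ++
        conn_comp (rem'.filter (fun e => !(pvFold rem' inc pre).contains e)) i =
      pvFold rem' inc (pre ++ [i]))
    ∧ ((rem'.filter (fun e => !(pvFold rem' inc pre).contains e)).filter
          (fun e => !(conn_comp (rem'.filter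
            (fun e => !(pvFold rem' inc pre).contains e)) i).contains e) =
        rem'.filter (fun e => !(pvFold rem' inc (pre ++ [i])).contains e)) := by
  have hrn : (rem'.filter (fun e => !(pvFold rem' inc pre).contains e)).Nodup := hn.filter _
  by_cases hall : ∀ e ∈ conn_comp rem' i, e ∈ pvFold rem' inc pre
  · -- i's whole component is already in the accumulated set: the pop collects nothing
    have hupd : PySem.Set.update (pvFold rem' inc pre) (conn_comp rem' i) =
        pvFold rem' inc pre := upd_of_subset hall
    have hcc : conn_comp (rem'.filter (fun e => !(pvFold rem' inc pre).contains e)) i = [] := by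
      rw [conn_comp_eq _ _ hrn, if_pos ?_]
      rw [pvInc, List.filter_eq_nil_iff]
      intro e he hb
      have heR : e ∈ rem' := List.mem_of_mem_filter he
      have hecc : e ∈ conn_comp rem' i :=
        cc_incident rem' hn i e heR (by simpa using hb)
      have heF : e ∈ pvFold rem' inc pre := hall e hecc
      have := (List.mem_filter.mp he).2
      simp [heF] at this
    constructor
    · rw [hcc, List.append_nil, pvFold_append_singleton, hupd]
    · rw [hcc, pvFold_append_singleton, hupd]
      simp
  · -- i's component is disjoint from everything collected so far: it is harvested unchanged
    simp only [not_forall] at hall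
    obtain ⟨e0, he0cc, he0F⟩ := hall
    have hdisj2 : ∀ e ∈ conn_comp rem' i, e ∉ pvFold rem' inc pre := by
      intro e he heF
      rcases (mem_pvFold _ _ _ _).mp heF with hI | ⟨j, hj, hej⟩
      · exact hdisj e hI (cc_subset rem'.length rem' le_rfl hn i e he)
      · exact he0F ((mem_pvFold _ _ _ _).mpr
          (Or.inr ⟨j, hj, cc_comp_subset rem' hn i j e he hej e0 he0cc⟩))
    have hfilt : conn_comp (rem'.filter (fun e => !(pvFold rem' inc pre).contains e)) i =
        conn_comp rem' i := by
      apply cc_filter_inv rem'.length rem' le_rfl hn _ i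
      intro e he
      simp [hdisj2 e he]
    have hnd : (conn_comp rem' i).Nodup := cc_nodup rem'.length rem' le_rfl hn i
    have happ : pvFold rem' inc (pre ++ [i]) =
        pvFold rem' inc pre ++ conn_comp rem' i := by
      rw [pvFold_append_singleton, upd_of_disjoint hnd hdisj2]
    constructor
    · rw [hfilt, happ]
    · rw [hfilt, happ, List.filter_filter]
      apply List.filter_congr
      intro e _
      by_cases h1 : e ∈ pvFold rem' inc pre <;> by_cases h2 : e ∈ conn_comp rem' i <;>
        simp [h1, h2]

-- the main loop invariant: popping v harvests exactly A's component of v, in A's order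
theorem loop_step : ∀ (n : Nat) (rem : List (Int × Int)), rem.length ≤ n → rem.Nodup →
    ∀ (comp : List (Int × Int)) (st : List Int) (v : Int),
      conn_comp_loop rem comp (v :: st) =
        conn_comp_loop (rem.filter (fun e => !(conn_comp rem v).contains e))
          (comp ++ conn_comp rem v) st := by
  intro n
  induction n with
  | zero =>
    intro rem hlen hn comp st v
    rw [List.length_eq_zero_iff.mp (Nat.le_zero.mp hlen)] at *
    rw [loop_cons]
    have hA : conn_comp [] v = [] := by
      rw [conn_comp_eq _ _ hn, if_pos (by simp [pvInc])]
    rw [hA]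
    simp [pvRem, pvInc, pvNbrs, PySem.List.dedup, PySem.Set.ofList]
  | succ n ih =>
    intro rem hlen hn comp st v
    by_cases hinc : pvInc rem v = []
    · -- v touches nothing: the pop is a no-op, and so is A
      rw [loop_cons]
      have hA : conn_comp rem v = [] := by rw [conn_comp_eq _ _ hn, if_pos hinc]
      have hrem : pvRem rem v = rem := by
        rw [pvRem, List.filter_eq_self]
        intro a ha
        have h5 := List.filter_eq_nil_iff.mp
          (show rem.filter (fun e => e.1 == v || e.2 == v) = [] from hinc) a ha
        simpa using h5
      have hnbrs : pvNbrs rem v = [] := by rw [pvNbrs, hinc]; rfl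
      rw [hA, hinc, hrem, hnbrs, List.append_nil, List.nil_append]
      have h1 : rem.filter (fun e => !(([] : List (Int × Int)).contains e)) = rem := by simp
      rw [h1]
    · -- v's component is harvested neighbour by neighbour
      have hlt := pvRem_length_lt hinc
      have hn' : (pvRem rem v).Nodup := hn.filter _
      have hdisj : ∀ e ∈ pvInc rem v, e ∉ pvRem rem v := fun e he => pvInc_disj_pvRem he
      have hA : conn_comp rem v = pvFold (pvRem rem v) (pvInc rem v) (pvNbrs rem v) := by
        rw [conn_comp_eq _ _ hn, if_neg hinc]
        rfl
      have I : ∀ (ns pre : List Int) (comp : List (Int × Int)) (st : List Int),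
          conn_comp_loop
            ((pvRem rem v).filter (fun e => !(pvFold (pvRem rem v) (pvInc rem v) pre).contains e))
            (comp ++ pvFold (pvRem rem v) (pvInc rem v) pre) (ns ++ st) =
          conn_comp_loop
            ((pvRem rem v).filter
              (fun e => !(pvFold (pvRem rem v) (pvInc rem v) (pre ++ ns)).contains e))
            (comp ++ pvFold (pvRem rem v) (pvInc rem v) (pre ++ ns)) st := by
        intro ns
        induction ns with
        | nil => intro pre comp st; rw [List.append_nil, List.nil_append]
        | cons i ns' ihns =>
          intro pre comp st
          have hr : ((pvRem rem v).filter
              (fun e => !(pvFold (pvRem rem v) (pvInc rem v) pre).contains e)).length ≤ n := by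
            have := List.length_filter_le
              (fun e => !(pvFold (pvRem rem v) (pvInc rem v) pre).contains e) (pvRem rem v)
            omega
          rw [List.cons_append, ih _ hr (hn'.filter _)]
          obtain ⟨hK1, hK2⟩ := harvest (pvRem rem v) (pvInc rem v) hn' hdisj pre i
          rw [List.append_assoc, hK1, hK2, ihns (pre ++ [i]) comp st, List.append_assoc,
            List.singleton_append]
      rw [loop_cons]
      have h0 : (pvRem rem v).filter
          (fun e => !(pvFold (pvRem rem v) (pvInc rem v) []).contains e) = pvRem rem v := by
        rw [List.filter_eq_self]
        intro e he
        have : e ∉ pvInc rem v := fun hI => hdisj e hI he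
        simpa [pvFold] using this
      have hI0 := I (pvNbrs rem v) [] comp st
      rw [List.nil_append, h0] at hI0
      rw [show pvFold (pvRem rem v) (pvInc rem v) [] = pvInc rem v from rfl] at hI0
      rw [hI0, ← hA]
      have hff : (pvRem rem v).filter (fun e => !(conn_comp rem v).contains e) =
          rem.filter (fun e => !(conn_comp rem v).contains e) := by
        rw [pvRem, List.filter_filter]
        apply List.filter_congr
        intro e he
        by_cases h2 : e ∈ conn_comp rem v
        · simp [h2]
        · have h3 : e ∉ pvInc rem v := by
            intro hI
            exact h2 (cc_incident rem hn v e he (mem_pvInc.mp hI).2)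
          have h4 : (e.1 == v || e.2 == v) = false := by
            rw [Bool.eq_false_iff]
            intro hb
            exact h3 (mem_pvInc.mpr ⟨he, by simpa using hb⟩)
          simp [h2, h4]
      rw [hff]

-- ===== VERDICT (by name: the statement is the Claim_ definition above) =====
theorem conn_comp_spec : Claim_equal_conn_comp := by
  intro s start _ hsorted
  have hpre : s.Nodup :=
    hsorted.imp fun {a b} h => fun heq => absurd (heq ▸ h) (lt_irrefl _)
  unfold Spec_conn_comp conn_comp_alt
  rw [loop_step s.length s le_rfl hpre]
  rw [loop_nil, List.nil_append,
    PySem.Set.ofList_eq_self_of_nodup _ (cc_nodup s.length s le_rfl hpre start)]
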